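-- pv_equiv track=rewrite | github.com/eunicell78-arch/study-helper | app.py | is_domain_trusted
-- ===== SOURCE A (Python) =====
-- TRUSTED_DOMAINS = [
--     "riss.kr",
--     "dbpia.co.kr",
--     "kci.go.kr",
--     "ndsl.kr",
--     "kiss.kstudy.com",
--     "scholar.google.com",
--     "scholar.google.co.kr",
--     "youtube.com",
--     "youtu.be",
--     "pubmed.ncbi.nlm.nih.gov",
--     "ncbi.nlm.nih.gov",
--     "sciencedirect.com",
--     "springer.com",
--     "wiley.com",
--     "nature.com",
--     "jstor.org",
--     "ieee.org",
--     "acm.org",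
--     "who.int",
--     "un.org",
--     "oecd.org",
--     "worldbank.org",
--     "korea.kr",
--     "chosun.com",
--     "joongang.co.kr",
--     "hani.co.kr",
--     "khan.co.kr",
--     "yonhap.co.kr",
--     "yna.co.kr",
--     "hankyung.com",
--     "donga.com",
--     "mk.co.kr",
--     "sedaily.com",
--     "ohmynews.com",
--     "icj-cij.org",
--     "pca-cpa.org",
--     "kbs.co.kr",
--     "mbc.co.kr",
--     "sbs.co.kr",
--     "ytn.co.kr",
--     "news1.kr",
--     "newsis.com",
-- ]
--
-- def is_domain_trusted(domain: str) -> bool: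
--     domain = domain.lower()
--     if domain.startswith("www."):
--         domain = domain[4:]
--     if (domain.endswith(".go.kr") or domain.endswith(".ac.kr")
--             or domain.endswith(".re.kr") or domain.endswith(".or.kr")):
--         return True
--     for trusted in TRUSTED_DOMAINS:
--         if domain == trusted or domain.endswith("." + trusted):
--             return True
--     return False
-- ===== SOURCE B (Python) =====
-- TRUSTED_DOMAINS = [
--     "riss.kr",
--     "dbpia.co.kr",
--     "kci.go.kr",
--     "ndsl.kr",
--     "kiss.kstudy.com",
--     "scholar.google.com",
--     "scholar.google.co.kr",
--     "youtube.com",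
--     "youtu.be",
--     "pubmed.ncbi.nlm.nih.gov",
--     "ncbi.nlm.nih.gov",
--     "sciencedirect.com",
--     "springer.com",
--     "wiley.com",
--     "nature.com",
--     "jstor.org",
--     "ieee.org",
--     "acm.org",
--     "who.int",
--     "un.org",
--     "oecd.org",
--     "worldbank.org",
--     "korea.kr",
--     "chosun.com",
--     "joongang.co.kr",
--     "hani.co.kr",
--     "khan.co.kr",
--     "yonhap.co.kr",
--     "yna.co.kr",
--     "hankyung.com",
--     "donga.com",
--     "mk.co.kr",
--     "sedaily.com",
--     "ohmynews.com",
--     "icj-cij.org",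
--     "pca-cpa.org",
--     "kbs.co.kr",
--     "mbc.co.kr",
--     "sbs.co.kr",
--     "ytn.co.kr",
--     "news1.kr",
--     "newsis.com",
-- ]
--
-- TRUSTED_SET = frozenset(TRUSTED_DOMAINS)
--
--
-- def is_domain_trusted(domain: str) -> bool:
--     d = domain.lower()
--     if d.startswith("www."):
--         d = d[4:]
--     if d.endswith((".go.kr", ".ac.kr", ".re.kr", ".or.kr")):
--         return True
--     if d in TRUSTED_SET:
--         return True
--     # scan the domain's own dot-suffixes instead of the trusted list
--     for i, ch in enumerate(d):
--         if ch == "." and d[i + 1:] in TRUSTED_SET: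
--             return True
--     return False
-- ===== Notes on version B (the rewrite author's own statement) =====
-- stated objective: idiomatic
-- what changed: Replaces A's endswith scan over the 42-entry trusted list by a scan over the domain's own dot-suffixes, each looked up in a frozenset.
import Mathlib
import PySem

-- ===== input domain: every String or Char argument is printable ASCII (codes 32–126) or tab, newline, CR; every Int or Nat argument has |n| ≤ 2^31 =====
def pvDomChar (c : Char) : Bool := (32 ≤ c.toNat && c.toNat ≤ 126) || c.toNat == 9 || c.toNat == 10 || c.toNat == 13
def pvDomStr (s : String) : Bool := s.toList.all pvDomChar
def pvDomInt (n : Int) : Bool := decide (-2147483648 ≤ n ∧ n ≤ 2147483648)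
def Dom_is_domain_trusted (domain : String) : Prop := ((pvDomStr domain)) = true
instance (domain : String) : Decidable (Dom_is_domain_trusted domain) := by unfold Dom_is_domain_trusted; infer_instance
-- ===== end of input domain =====

-- B replaces A's endswith scan over the 42-entry trusted list by a scan over the
-- domain's own dot-suffixes, each looked up in a frozenset (objective: idiomatic).

-- the module-level constant TRUSTED_DOMAINS (shared context of both programs)
def trustedDomains : List String := [
  "riss.kr", "dbpia.co.kr", "kci.go.kr", "ndsl.kr", "kiss.kstudy.com",
  "scholar.google.com", "scholar.google.co.kr", "youtube.com", "youtu.be",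
  "pubmed.ncbi.nlm.nih.gov", "ncbi.nlm.nih.gov", "sciencedirect.com",
  "springer.com", "wiley.com", "nature.com", "jstor.org", "ieee.org",
  "acm.org", "who.int", "un.org", "oecd.org", "worldbank.org", "korea.kr",
  "chosun.com", "joongang.co.kr", "hani.co.kr", "khan.co.kr", "yonhap.co.kr",
  "yna.co.kr", "hankyung.com", "donga.com", "mk.co.kr", "sedaily.com",
  "ohmynews.com", "icj-cij.org", "pca-cpa.org", "kbs.co.kr", "mbc.co.kr",
  "sbs.co.kr", "ytn.co.kr", "news1.kr", "newsis.com"]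

-- ===== PORT A =====
def is_domain_trusted (domain : String) : Bool :=
  let d := PySem.Str.lower domain
  let d := if PySem.Str.startswith d "www." then PySem.Str.slice d (some 4) none else d
  if PySem.Str.endswith d ".go.kr" || PySem.Str.endswith d ".ac.kr"
      || PySem.Str.endswith d ".re.kr" || PySem.Str.endswith d ".or.kr" then
    true
  else
    -- the for-loop with early return over TRUSTED_DOMAINS
    trustedDomains.any (fun trusted =>
      d == trusted || PySem.Str.endswith d ("." ++ trusted))

-- ===== PORT B =====
-- TRUSTED_SET = frozenset(TRUSTED_DOMAINS), held as the distinct char-lists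
def trustedSet : PySem.Set (List Char) := PySem.Set.ofList (trustedDomains.map String.toList)

-- 'for i, ch in enumerate(d): if ch == "." and d[i+1:] in TRUSTED_SET: return True'
def scanDots : List Char → Bool
  | [] => false
  | c :: rest => (c == '.' && PySem.Set.contains trustedSet rest) || scanDots rest

def is_domain_trusted_alt (domain : String) : Bool :=
  let d := PySem.Str.lower domain
  let d := if PySem.Str.startswith d "www." then PySem.Str.slice d (some 4) none else d
  if PySem.Str.endswith d ".go.kr" || PySem.Str.endswith d ".ac.kr"
      || PySem.Str.endswith d ".re.kr" || PySem.Str.endswith d ".or.kr" then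
    true
  else if PySem.Set.contains trustedSet d.toList then
    true
  else
    scanDots d.toList

-- ===== PRECONDITION & SPEC =====
def Spec_is_domain_trusted (domain : String) (out : Bool) : Prop := out = is_domain_trusted_alt domain
instance (domain : String) (out : Bool) : Decidable (Spec_is_domain_trusted domain out) := by unfold Spec_is_domain_trusted; infer_instance

-- ===== CLAIM (what is proved, stated in full; the proofs are below) =====
def Claim_equal_is_domain_trusted : Prop := ∀ (domain : String), Dom_is_domain_trusted domain → Spec_is_domain_trusted domain (is_domain_trusted domain)

-- ===== LEMMAS AND PROOFS =====

lemma contains_ofList (l : List (List Char)) (x : List Char) :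
    PySem.Set.contains (PySem.Set.ofList l) x = true ↔ x ∈ l := by
  simp [PySem.Set.contains, PySem.Set.mem_ofList]

lemma mem_trustedSet_iff (cs : List Char) :
    PySem.Set.contains trustedSet cs = true ↔ ∃ t ∈ trustedDomains, cs = t.toList := by
  unfold trustedSet
  simp only [contains_ofList, List.mem_map]
  constructor
  · rintro ⟨t, ht, h⟩; exact ⟨t, ht, h.symm⟩
  · rintro ⟨t, ht, h⟩; exact ⟨t, ht, h.symm⟩

lemma scanDots_iff (cs : List Char) :
    scanDots cs = true ↔ ∃ t ∈ trustedDomains, ('.' :: t.toList) <:+ cs := by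
  induction cs with
  | nil => simp [scanDots]
  | cons c r ih =>
    simp only [scanDots, Bool.or_eq_true, Bool.and_eq_true, beq_iff_eq, ih,
      mem_trustedSet_iff, List.suffix_cons_iff, List.cons.injEq]
    constructor
    · rintro (⟨rfl, t, ht, rfl⟩ | ⟨t, ht, h⟩)
      · exact ⟨t, ht, Or.inl ⟨rfl, rfl⟩⟩
      · exact ⟨t, ht, Or.inr h⟩
    · rintro ⟨t, ht, ⟨rfl, h⟩ | h⟩
      · exact Or.inl ⟨rfl, t, ht, h.symm⟩
      · exact Or.inr ⟨t, ht, h⟩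

lemma dot_toList : ".".toList = ['.'] := rfl

lemma key (d : String) :
    (trustedDomains.any (fun trusted => d == trusted || PySem.Str.endswith d ("." ++ trusted)))
      = (PySem.Set.contains trustedSet d.toList || scanDots d.toList) := by
  rw [Bool.eq_iff_iff]
  simp only [List.any_eq_true, Bool.or_eq_true, beq_iff_eq, PySem.Str.endswith_eq,
    String.toList_append, dot_toList, List.singleton_append, PySem.Chars.endswith_iff,
    mem_trustedSet_iff, scanDots_iff, String.toList_inj]
  constructor
  · rintro ⟨t, ht, h | h⟩
    · exact Or.inl ⟨t, ht, h⟩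
    · exact Or.inr ⟨t, ht, h⟩
  · rintro (⟨t, ht, h⟩ | ⟨t, ht, h⟩)
    · exact ⟨t, ht, Or.inl h⟩
    · exact ⟨t, ht, Or.inr h⟩

lemma branch (d : String) :
    (if PySem.Str.endswith d ".go.kr" || PySem.Str.endswith d ".ac.kr"
        || PySem.Str.endswith d ".re.kr" || PySem.Str.endswith d ".or.kr" then
      true
    else
      trustedDomains.any (fun trusted => d == trusted || PySem.Str.endswith d ("." ++ trusted)))
    = (if PySem.Str.endswith d ".go.kr" || PySem.Str.endswith d ".ac.kr"
        || PySem.Str.endswith d ".re.kr" || PySem.Str.endswith d ".or.kr" then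
      true
    else if PySem.Set.contains trustedSet d.toList then true else scanDots d.toList) := by
  split
  · rfl
  · rw [key]
    cases h : PySem.Set.contains trustedSet d.toList <;> simp

-- ===== VERDICT (by name: the statement is the Claim_ definition above) =====
theorem is_domain_trusted_spec : Claim_equal_is_domain_trusted := by
  intro domain _
  exact branch (if PySem.Str.startswith (PySem.Str.lower domain) "www."
    then PySem.Str.slice (PySem.Str.lower domain) (some 4) none
    else PySem.Str.lower domain)
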